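-- pv_equiv track=rewrite | github.com/Daidaio/semiconductor-training-system | core/agents/diagnostic_agent.py | _categorize_faults
-- ===== SOURCE A (Python) =====
-- from typing import Dict, List
--
-- def _categorize_faults(abnormal_sensors: List) -> Dict:
--     """將異常感測器分類到故障類型"""
--     categories = {
--         "chamber_pressure": [],
--         "temperature": [],
--         "flow_rate": [],
--         "electrical": [],
--         "optical_intensity": [],
--         "alignment_accuracy": []
--     }
--
--     for sensor in abnormal_sensors:
--         category = sensor.get("category", "unknown")
--         if category in categories:
--             categories[category].append(sensor)
--
--     # 過濾空分類
--     return {k: v for k, v in categories.items() if len(v) > 0}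
-- ===== SOURCE B (Python) =====
-- def _categorize_faults(abnormal_sensors):
--     names = ["chamber_pressure", "temperature", "flow_rate",
--              "electrical", "optical_intensity", "alignment_accuracy"]
--     return {c: g for c in names
--             if (g := [s for s in abnormal_sensors
--                       if s.get("category", "unknown") == c])}
-- ===== Notes on version B (the rewrite author's own statement) =====
-- stated objective: idiomatic
-- what changed: B loops over the six fixed category names and filters the sensor list once per category (dict comprehension with a walrus-bound group), instead of A's single grouping pass that mutates a pre-built dict of empty lists and then filters out empty entries.
import Mathlib
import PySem

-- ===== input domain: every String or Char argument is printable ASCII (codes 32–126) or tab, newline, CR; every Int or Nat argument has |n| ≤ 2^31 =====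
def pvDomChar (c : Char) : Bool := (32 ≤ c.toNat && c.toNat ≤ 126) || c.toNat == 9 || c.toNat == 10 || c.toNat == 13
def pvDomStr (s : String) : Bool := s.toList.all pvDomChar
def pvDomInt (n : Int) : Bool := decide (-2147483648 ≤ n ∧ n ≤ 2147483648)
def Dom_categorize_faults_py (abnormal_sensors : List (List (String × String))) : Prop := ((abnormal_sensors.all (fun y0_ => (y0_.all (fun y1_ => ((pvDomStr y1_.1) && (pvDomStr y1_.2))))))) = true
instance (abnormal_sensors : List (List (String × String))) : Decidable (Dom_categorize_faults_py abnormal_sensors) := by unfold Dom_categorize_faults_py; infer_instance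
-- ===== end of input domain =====

-- B groups by looping over the six fixed category names and filtering the sensors per
-- category, instead of A's single mutate-a-dict-of-empty-lists pass; objective: idiomatic.

-- shared helper: sensor.get("category", "unknown")
def sensorCat (s : List (String × String)) : String :=
  (PySem.Dict.mk s).getD "category" "unknown"

-- ===== PORT A =====
def categorize_faults_py (abnormal_sensors : List (List (String × String))) :
    List (String × List (List (String × String))) :=
  let categories : PySem.Dict String (List (List (String × String))) :=
    PySem.Dict.ofList [("chamber_pressure", []), ("temperature", []), ("flow_rate", []),
      ("electrical", []), ("optical_intensity", []), ("alignment_accuracy", [])]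
  let categories := abnormal_sensors.foldl (fun d sensor =>
    let category := sensorCat sensor
    if d.contains category then d.modify category [] (· ++ [sensor]) else d) categories
  -- dict comprehension filtering empty groups (keys are already distinct)
  categories.items.filter (fun kv => kv.2.length > 0)

-- ===== PORT B =====
def categorize_faults_py_alt (abnormal_sensors : List (List (String × String))) :
    List (String × List (List (String × String))) :=
  ["chamber_pressure", "temperature", "flow_rate",
   "electrical", "optical_intensity", "alignment_accuracy"].filterMap (fun c =>
    let g := abnormal_sensors.filter (fun s => sensorCat s == c)
    if g.length > 0 then some (c, g) else none)

-- ===== PRECONDITION & SPEC =====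
def Spec_categorize_faults_py (abnormal_sensors : List (List (String × String)))
    (out : List (String × List (List (String × String)))) : Prop :=
  out = categorize_faults_py_alt abnormal_sensors
instance (abnormal_sensors : List (List (String × String)))
    (out : List (String × List (List (String × String)))) :
    Decidable (Spec_categorize_faults_py abnormal_sensors out) := by
  unfold Spec_categorize_faults_py; infer_instance

-- ===== CLAIM =====
def Claim_equal_categorize_faults_py : Prop :=
  ∀ (abnormal_sensors : List (List (String × String))),
    Dom_categorize_faults_py abnormal_sensors →
    Spec_categorize_faults_py abnormal_sensors (categorize_faults_py abnormal_sensors)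

-- ===== LEMMAS AND PROOFS =====

def faultStep (d : PySem.Dict String (List (List (String × String))))
    (sensor : List (String × String)) : PySem.Dict String (List (List (String × String))) :=
  if d.contains (sensorCat sensor) then d.modify (sensorCat sensor) [] (· ++ [sensor]) else d

lemma keys_fold (l : List (List (String × String)))
    (d : PySem.Dict String (List (List (String × String)))) :
    (l.foldl faultStep d).keys = d.keys := by
  induction l generalizing d with
  | nil => rfl
  | cons s t ih =>
    simp only [List.foldl_cons, ih]
    unfold faultStep
    split
    · rename_i h; simp [PySem.Dict.keys_modify, PySem.Dict.keys_insert_of_contains, h]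
    · rfl

lemma getD_fold (l : List (List (String × String)))
    (d : PySem.Dict String (List (List (String × String)))) (k : String)
    (hk : d.contains k = true) :
    (l.foldl faultStep d).getD k [] =
      d.getD k [] ++ l.filter (fun s => sensorCat s == k) := by
  induction l generalizing d with
  | nil => simp
  | cons s t ih =>
    simp only [List.foldl_cons, List.filter_cons]
    have hk' : (faultStep d s).contains k = true := by
      unfold faultStep; split
      · rw [PySem.Dict.contains_modify]; simp [hk]
      · exact hk
    rw [ih _ hk']
    unfold faultStep
    by_cases hc : d.contains (sensorCat s) = true
    · simp only [hc, if_true]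
      rw [PySem.Dict.getD_modify]
      by_cases he : k = sensorCat s
      · subst he; simp
      · have : sensorCat s ≠ k := fun h => he h.symm
        simp [he, beq_iff_eq, Ne.symm he]
    · simp only [hc, if_false, Bool.false_eq_true]
      have : (sensorCat s == k) = false := by
        by_contra h
        have : sensorCat s = k := by
          have := eq_true_of_ne_false h; exact beq_iff_eq.mp this
        rw [this] at hc; exact hc hk
      simp [this]

lemma filter_map_eq_filterMap {α β : Type} (K : List α) (G : α → List β) :
    (K.map (fun k => (k, G k))).filter (fun kv => kv.2.length > 0) =
      K.filterMap (fun c => if (G c).length > 0 then some (c, G c) else none) := by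
  induction K with
  | nil => rfl
  | cons a t ih =>
    simp only [List.map_cons, List.filter_cons, List.filterMap_cons]
    by_cases h : (G a).length > 0
    · simp [h, ih]
    · simp [h, ih]

-- ===== VERDICT =====
theorem categorize_faults_py_spec : Claim_equal_categorize_faults_py := by
  intro xs _
  unfold Spec_categorize_faults_py categorize_faults_py categorize_faults_py_alt
  show ((xs.foldl faultStep _).items.filter _) = _
  set d0 : PySem.Dict String (List (List (String × String))) :=
    PySem.Dict.ofList [("chamber_pressure", []), ("temperature", []), ("flow_rate", []),
      ("electrical", []), ("optical_intensity", []), ("alignment_accuracy", [])] with hd0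
  have hkeys : (xs.foldl faultStep d0).keys =
      ["chamber_pressure", "temperature", "flow_rate",
       "electrical", "optical_intensity", "alignment_accuracy"] := by
    rw [keys_fold]; decide
  have hnd : (xs.foldl faultStep d0).keys.Nodup := by rw [hkeys]; decide
  rw [PySem.Dict.items_eq_map_keys _ hnd ([] : List (List (String × String))), hkeys]
  have hg : ∀ k ∈ ["chamber_pressure", "temperature", "flow_rate",
       "electrical", "optical_intensity", "alignment_accuracy"],
      (xs.foldl faultStep d0).getD k [] = xs.filter (fun s => sensorCat s == k) := by
    intro k hk
    have hc : d0.contains k = true := by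
      fin_cases hk <;> decide
    rw [getD_fold _ _ _ hc]
    have : d0.getD k [] = [] := by fin_cases hk <;> decide
    rw [this]; rfl
  rw [List.map_congr_left (fun k hk => by rw [hg k hk])]
  exact filter_map_eq_filterMap _ _
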